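-- pv_equiv track=rewrite | github.com/happyhob/Programmers | cording_basic_training/A강조하기.py | solution
-- ===== SOURCE A (Python) =====
-- def solution(myString):
--     newStr =""
--     for s in myString:
--         if s =="a" or s=="A":
--             s =s.upper()
--             newStr+= s
--         else:
--             s =s.lower()
--             newStr+= s
--     return newStr
-- ===== SOURCE B (Python) =====
-- def solution(myString):
--     return myString.lower().replace("a", "A")
-- ===== Notes on version B (the rewrite author's own statement) =====
-- stated objective: faster
-- what changed: Replaces the explicit per-character loop with quadratic string concatenation by two whole-string library passes: lowercase everything, then replace every 'a' with 'A' (correct because 'a' and 'A' are the only characters whose lowercase is 'a').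
import Mathlib
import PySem

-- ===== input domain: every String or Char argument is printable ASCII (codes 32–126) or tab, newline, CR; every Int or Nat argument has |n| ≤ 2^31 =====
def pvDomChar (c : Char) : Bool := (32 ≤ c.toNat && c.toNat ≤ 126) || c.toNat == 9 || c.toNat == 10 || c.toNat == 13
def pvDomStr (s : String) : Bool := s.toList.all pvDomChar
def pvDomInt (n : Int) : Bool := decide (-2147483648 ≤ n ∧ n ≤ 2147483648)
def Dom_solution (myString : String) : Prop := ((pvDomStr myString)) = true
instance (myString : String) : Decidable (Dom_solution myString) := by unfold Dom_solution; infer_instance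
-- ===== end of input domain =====

-- B replaces A's per-character loop with two whole-string passes (lower, then replace "a"→"A"); idiomatic.

-- ===== PORT A =====
-- literal transliteration: accumulate the output characters left to right, branching per character
def solution (myString : String) : String :=
  String.ofList (myString.toList.foldl
    (fun newStr s =>
      if s = 'a' ∨ s = 'A' then newStr ++ [PySem.Chars.upperChar s]
      else newStr ++ [PySem.Chars.lowerChar s])
    [])

-- ===== PORT B =====
def solution_alt (myString : String) : String :=
  PySem.Str.replace (PySem.Str.lower myString) "a" "A"

-- ===== PRECONDITION & SPEC =====
def Spec_solution (myString : String) (out : String) : Prop := out = solution_alt myString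
instance (myString : String) (out : String) : Decidable (Spec_solution myString out) := by unfold Spec_solution; infer_instance

-- ===== CLAIM (what is proved, stated in full; the proofs are below) =====
def Claim_equal_solution : Prop := ∀ (myString : String), Dom_solution myString → Spec_solution myString (solution myString)

-- ===== LEMMAS AND PROOFS =====

-- replace.go with old = "a": every 'a' becomes 'A', everything else is kept
theorem replace_go_single (fuel : Nat) : ∀ (l acc : List Char), l.length ≤ fuel →
    PySem.Chars.replace.go ['a'] ['A'] fuel l acc
      = acc.reverse ++ l.map (fun c => if c = 'a' then 'A' else c) := by
  induction fuel with
  | zero =>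
    intro l acc h
    have : l = [] := List.length_eq_zero_iff.mp (Nat.le_zero.mp h)
    subst this; simp [PySem.Chars.replace.go]
  | succ n ih =>
    intro l acc h
    cases l with
    | nil => simp [PySem.Chars.replace.go]
    | cons c t =>
      by_cases hc : c = 'a'
      · subst hc
        have hpre : List.isPrefixOf ['a'] ('a' :: t) = true := by
          simp [List.isPrefixOf]
        simp only [PySem.Chars.replace.go, hpre, if_pos]
        rw [show List.drop ['a'].length ('a' :: t) = t from rfl,
            show (['A'].reverse ++ acc) = 'A' :: acc from rfl,
            ih t ('A' :: acc) (by simpa using Nat.le_of_succ_le_succ h)]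
        simp
      · have hpre : List.isPrefixOf ['a'] (c :: t) = false := by
          simp only [List.isPrefixOf, Bool.and_true]
          exact decide_eq_false fun h => hc h.symm
        simp only [PySem.Chars.replace.go, hpre]
        rw [if_neg (by simp)]
        rw [ih t _ (by simpa using Nat.le_of_succ_le_succ h)]
        simp [hc]

-- pointwise: lowercasing then fixing 'a' is exactly A's per-character branch (for every Char)
theorem char_step (c : Char) :
    (if PySem.Chars.lowerChar c = 'a' then 'A' else PySem.Chars.lowerChar c)
      = (if c = 'a' ∨ c = 'A' then PySem.Chars.upperChar c else PySem.Chars.lowerChar c) := by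
  by_cases h1 : c = 'a'
  · simp [h1]; decide
  · by_cases h2 : c = 'A'
    · simp [h2]; decide
    · have hne : PySem.Chars.lowerChar c ≠ 'a' := by
        simp only [PySem.Chars.lowerChar, PySem.Chars.isupper]
        split_ifs with h
        · simp only [decide_eq_true_eq, Bool.and_eq_true] at h
          have hhi : c.toNat ≤ 90 := UInt32.le_iff_toNat_le.mp (Char.le_def.mp h.2)
          intro hc
          have hv : Nat.isValidChar (c.toNat + 32) := Or.inl (by omega)
          have h97 : (Char.ofNat (c.toNat + 32)).toNat = c.toNat + 32 := by
            rw [Char.toNat_ofNat]; simp [hv]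
          have h2' : (Char.ofNat (c.toNat + 32)).toNat = 97 := by rw [hc]; decide
          have hc65 : c.toNat = 65 := by omega
          exact h2 (Char.ext (by
            have hv2 : c.val = 65 := by
              apply UInt32.toNat_inj.mp; simpa using hc65
            simp [hv2]))
        · exact h1
      simp [hne, h1, h2]

-- ===== VERDICT (by name: the statement is the Claim_ definition above) =====
theorem solution_spec : Claim_equal_solution := by
  intro myString _
  unfold Spec_solution solution solution_alt
  have hfun : (fun (newStr : List Char) (s : Char) =>
      if s = 'a' ∨ s = 'A' then newStr ++ [PySem.Chars.upperChar s]
      else newStr ++ [PySem.Chars.lowerChar s])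
    = fun newStr s => newStr ++
        [if s = 'a' ∨ s = 'A' then PySem.Chars.upperChar s else PySem.Chars.lowerChar s] := by
    funext a c; split <;> rfl
  apply String.toList_injective
  rw [hfun, PySem.List.foldl_append_singleton_eq_map]
  simp only [PySem.Str.toList_replace, PySem.Str.toList_lower, String.toList_ofList]
  show _ = PySem.Chars.replace (PySem.Chars.lower myString.toList) ('a' :: []) ('A' :: [])
  rw [PySem.Chars.replace]
  simp only [List.isEmpty_cons, if_false, Bool.false_eq_true]
  rw [replace_go_single _ _ _ (le_refl _)]
  simp only [List.reverse_nil, List.nil_append, PySem.Chars.lower, List.map_map, List.nil_append]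
  exact (List.map_congr_left fun c _ => (char_step c).symm)
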